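-- pv_equiv track=rewrite | github.com/Mikeaires/thesis | streamlit_review/app.py | _mark_progress
-- ===== SOURCE A (Python) =====
-- from typing import Dict, List, Tuple
--
-- def _mark_progress(sample: List[dict], ann: Dict[str, dict]) -> Tuple[int, Dict[str, int]]:
--     counts = {"True": 0, "Maybe": 0, "False": 0}
--     filled = 0
--     for row in sample:
--         a = ann.get(row["ad_id"])
--         if a and a.get("label") in counts:
--             counts[a["label"]] += 1
--             filled += 1
--     return filled, counts
-- ===== SOURCE B (Python) =====
-- def _mark_progress(sample, ann):
--     mult = {}
--     for row in sample:
--         k = row["ad_id"]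
--         mult[k] = mult.get(k, 0) + 1
--     counts = {"True": 0, "Maybe": 0, "False": 0}
--     filled = 0
--     for ad_id, a in ann.items():
--         if a and a.get("label") in counts and ad_id in mult:
--             n = mult[ad_id]
--             counts[a["label"]] += n
--             filled += n
--     return filled, counts
-- ===== Notes on version B (the rewrite author's own statement) =====
-- stated objective: alternative
-- what changed: Inverted the traversal: instead of scanning sample and looking each row up in ann, B first tallies ad_id multiplicities from sample into a counter dict, then iterates over ann.items() once, adding each valid annotation's multiplicity to its label count.
import Mathlib
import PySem

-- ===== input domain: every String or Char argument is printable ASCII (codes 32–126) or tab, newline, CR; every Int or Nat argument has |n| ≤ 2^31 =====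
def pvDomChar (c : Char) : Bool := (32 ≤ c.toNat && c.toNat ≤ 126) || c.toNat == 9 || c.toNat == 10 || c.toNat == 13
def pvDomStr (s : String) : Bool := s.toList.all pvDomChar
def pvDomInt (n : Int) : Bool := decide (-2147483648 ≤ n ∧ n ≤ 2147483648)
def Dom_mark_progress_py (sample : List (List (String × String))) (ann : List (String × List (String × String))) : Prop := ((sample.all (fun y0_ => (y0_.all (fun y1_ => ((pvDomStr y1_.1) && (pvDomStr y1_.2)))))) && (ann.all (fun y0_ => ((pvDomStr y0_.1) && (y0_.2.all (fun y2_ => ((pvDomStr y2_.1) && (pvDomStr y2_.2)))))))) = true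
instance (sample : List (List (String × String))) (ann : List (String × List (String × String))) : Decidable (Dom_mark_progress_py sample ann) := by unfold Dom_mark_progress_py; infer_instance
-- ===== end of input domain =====

-- B inverts the traversal: instead of scanning sample and looking each row up in ann, it first tallies
-- ad_id multiplicities from sample into a counter, then iterates over ann once, adding each valid
-- annotation's multiplicity to its label count (objective: alternative algorithm, same cost).

-- shared primitive: first-match association-list lookup (Python dict lookup under the task's convention)
def lookupS {α : Type} : List (String × α) → String → Option α
  | [], _ => none
  | (k', v) :: t, k => if k' == k then some v else lookupS t k

-- ===== PORT A =====
-- counts[l] += 1 on the first entry with key l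
def bumpA : List (String × Int) → String → List (String × Int)
  | [], _ => []
  | (k', v) :: t, k => if k' == k then (k', v + 1) :: t else (k', v) :: bumpA t k

-- `l in counts` (dict key membership)
def containsKeyA : List (String × Int) → String → Bool
  | [], _ => false
  | (k', _) :: t, k => k' == k || containsKeyA t k

-- the for-loop of A; on a row without "ad_id" Python raises KeyError (excluded by Pre_): the port stops there
def loopA (ann : List (String × List (String × String))) :
    List (List (String × String)) → List (String × Int) → Int → Int × (List (String × Int))
  | [], counts, filled => (filled, counts)
  | row :: rest, counts, filled =>
    match lookupS row "ad_id" with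
    | none => (filled, counts)  -- KeyError in Python; outside Pre_
    | some key =>
      match lookupS ann key with
      | none => loopA ann rest counts filled
      | some a =>
        if a.isEmpty then loopA ann rest counts filled  -- `a` falsy
        else
          match lookupS a "label" with
          | none => loopA ann rest counts filled
          | some l =>
            if containsKeyA counts l then loopA ann rest (bumpA counts l) (filled + 1)
            else loopA ann rest counts filled

def mark_progress_py (sample : List (List (String × String))) (ann : List (String × List (String × String))) : Int × (List (String × Int)) :=
  loopA ann sample [("True", 0), ("Maybe", 0), ("False", 0)] 0

-- ===== PORT B =====
-- mult[k] = mult.get(k, 0) + 1: bump the first entry with key k, else append (k, 1)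
def bumpCount : List (String × Int) → String → List (String × Int)
  | [], k => [(k, 1)]
  | (k', v) :: t, k => if k' == k then (k', v + 1) :: t else (k', v) :: bumpCount t k

-- B's first loop: tally ad_id multiplicities; a row without "ad_id" raises KeyError in Python
-- (outside Pre_), the port takes "" there
def multB : List (List (String × String)) → List (String × Int) → List (String × Int)
  | [], m => m
  | row :: rest, m => multB rest (bumpCount m ((lookupS row "ad_id").getD ""))

-- counts[l] += n on the first entry with key l
def bumpBy : List (String × Int) → String → Int → List (String × Int)
  | [], _, _ => []
  | (k', v) :: t, k, n => if k' == k then (k', v + n) :: t else (k', v) :: bumpBy t k n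

-- B's second loop, over ann.items()
def loopB (mult : List (String × Int)) :
    List (String × List (String × String)) → List (String × Int) → Int → Int × (List (String × Int))
  | [], counts, filled => (filled, counts)
  | (adid, a) :: rest, counts, filled =>
    if a.isEmpty then loopB mult rest counts filled  -- `a` falsy
    else
      match lookupS a "label" with
      | none => loopB mult rest counts filled
      | some l =>
        if containsKeyA counts l && containsKeyA mult adid then
          loopB mult rest (bumpBy counts l ((lookupS mult adid).getD 0))
            (filled + (lookupS mult adid).getD 0)
        else loopB mult rest counts filled

def mark_progress_py_alt (sample : List (List (String × String))) (ann : List (String × List (String × String))) : Int × (List (String × Int)) :=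
  loopB (multB sample []) ann [("True", 0), ("Maybe", 0), ("False", 0)] 0

-- ===== PRECONDITION & SPEC =====
-- Pre_ excludes (a) rows on which Python's row["ad_id"] raises KeyError, and (b) assoc lists with
-- duplicate keys in ann, which represent no Python dict (dict keys are unique)
def Pre_mark_progress_py (sample : List (List (String × String))) (ann : List (String × List (String × String))) : Prop :=
  (∀ row ∈ sample, "ad_id" ∈ row.map Prod.fst) ∧ (ann.map Prod.fst).Nodup

instance (sample : List (List (String × String))) (ann : List (String × List (String × String))) : Decidable (Pre_mark_progress_py sample ann) := by unfold Pre_mark_progress_py; infer_instance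

def pvWitness_mark_progress_py : (List (List (String × String))) × (List (String × List (String × String))) :=
  ([[("ad_id", "x")], [("ad_id", "y")], [("ad_id", "x")]], [("x", [("label", "True")]), ("y", [("label", "No")])])

def Spec_mark_progress_py (sample : List (List (String × String))) (ann : List (String × List (String × String))) (out : Int × (List (String × Int))) : Prop := out = mark_progress_py_alt sample ann
instance (sample : List (List (String × String))) (ann : List (String × List (String × String))) (out : Int × (List (String × Int))) : Decidable (Spec_mark_progress_py sample ann out) := by unfold Spec_mark_progress_py; infer_instance

-- ===== CLAIM (what is proved, stated in full; the proofs are below) =====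
def Claim_equal_mark_progress_py : Prop := ∀ (sample : List (List (String × String))) (ann : List (String × List (String × String))), Dom_mark_progress_py sample ann → Pre_mark_progress_py sample ann → Spec_mark_progress_py sample ann (mark_progress_py sample ann)

-- ===== LEMMAS AND PROOFS =====

-- the key of a row (defined under Pre_)
def keyOf (row : List (String × String)) : String := (lookupS row "ad_id").getD ""

-- the valid label, if any, of an optional annotation record
def hlab : Option (List (String × String)) → Option String
  | none => none
  | some a =>
    if a.isEmpty then none
    else
      match lookupS a "label" with
      | none => none
      | some l => if l == "True" || l == "Maybe" || l == "False" then some l else none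

-- the list of valid labels met by A's loop, in order
def labelsL (ann : List (String × List (String × String))) : List (List (String × String)) → List String
  | [] => []
  | row :: rest =>
    match hlab (lookupS ann (keyOf row)) with
    | some l => l :: labelsL ann rest
    | none => labelsL ann rest

def valAt (m : List (String × Int)) (k : String) : Int := (lookupS m k).getD 0

lemma lookupS_isSome_of_mem {α : Type} (row : List (String × α)) (h : "ad_id" ∈ row.map Prod.fst) :
    (lookupS row "ad_id").isSome := by
  induction row with
  | nil => simp at h
  | cons p t ih =>
    obtain ⟨k, v⟩ := p
    simp only [List.map_cons, List.mem_cons] at h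
    simp only [lookupS]
    by_cases hk : (k == "ad_id") = true
    · simp [hk]
    · have hne : k ≠ "ad_id" := by simpa using hk
      rcases h with h | h
      · exact absurd h.symm hne
      · simp [hk, ih h]

lemma lookupS_eq_none_of_not_mem {α : Type} (m : List (String × α)) (k : String)
    (h : k ∉ m.map Prod.fst) : lookupS m k = none := by
  induction m with
  | nil => rfl
  | cons p t ih =>
    obtain ⟨k', v⟩ := p
    simp only [List.map_cons, List.mem_cons] at h
    push_neg at h
    simp [lookupS, Ne.symm h.1, ih h.2]

lemma loopA_eq (ann : List (String × List (String × String))) :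
    ∀ (sample : List (List (String × String))),
      (∀ row ∈ sample, "ad_id" ∈ row.map Prod.fst) →
      ∀ (t m f filled : Int),
        loopA ann sample [("True", t), ("Maybe", m), ("False", f)] filled =
          (filled + ((labelsL ann sample).length : Int),
           [("True", t + ((labelsL ann sample).count "True" : Int)),
            ("Maybe", m + ((labelsL ann sample).count "Maybe" : Int)),
            ("False", f + ((labelsL ann sample).count "False" : Int))]) := by
  intro sample
  induction sample with
  | nil => intro _ t m f filled; simp [loopA, labelsL]
  | cons row rest ih =>
    intro hpre t m f filled
    have hrow := lookupS_isSome_of_mem row (hpre row (by simp))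
    have hrest : ∀ r ∈ rest, "ad_id" ∈ r.map Prod.fst := fun r hr => hpre r (by simp [hr])
    obtain ⟨key, hkey⟩ := Option.isSome_iff_exists.mp hrow
    simp only [loopA, labelsL, keyOf, hlab, hkey, Option.getD_some]
    cases hann : lookupS ann key with
    | none => simpa using ih hrest t m f filled
    | some a =>
      by_cases hae : a.isEmpty
      · simpa [hae] using ih hrest t m f filled
      · simp only [hae, if_neg, Bool.false_eq_true, not_false_eq_true]
        cases hlbl : lookupS a "label" with
        | none => simpa using ih hrest t m f filled
        | some l =>
          by_cases hmem : l = "True" ∨ l = "Maybe" ∨ l = "False"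
          · have hck : containsKeyA [("True", t), ("Maybe", m), ("False", f)] l = true := by
              rcases hmem with h | h | h <;> simp [containsKeyA, h]
            have hif : (l == "True" || l == "Maybe" || l == "False") = true := by
              rcases hmem with h | h | h <;> simp [h]
            rcases hmem with h | h | h <;> subst h <;>
              simp [hck, bumpA, ih hrest] <;> constructor <;> omega
          · have hck : containsKeyA [("True", t), ("Maybe", m), ("False", f)] l = false := by
              have h1 : l ≠ "True" := fun h => hmem (Or.inl h)
              have h2 : l ≠ "Maybe" := fun h => hmem (Or.inr (Or.inl h))
              have h3 : l ≠ "False" := fun h => hmem (Or.inr (Or.inr h))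
              simp [containsKeyA, Ne.symm h1, Ne.symm h2, Ne.symm h3]
            have hif : (l == "True" || l == "Maybe" || l == "False") = false := by
              have h1 : l ≠ "True" := fun h => hmem (Or.inl h)
              have h2 : l ≠ "Maybe" := fun h => hmem (Or.inr (Or.inl h))
              have h3 : l ≠ "False" := fun h => hmem (Or.inr (Or.inr h))
              simp [h1, h2, h3]
            simpa [hck, hif] using ih hrest t m f filled

-- bumpCount / multB characterisation
lemma valAt_bumpCount (m : List (String × Int)) (k k' : String) :
    valAt (bumpCount m k) k' = valAt m k' + (if k = k' then 1 else 0) := by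
  induction m with
  | nil => by_cases h : k = k' <;> simp [bumpCount, valAt, lookupS, h]
  | cons p t ih =>
    obtain ⟨a, b⟩ := p
    by_cases h1 : a = k
    · subst h1
      by_cases h2 : a = k' <;> simp [bumpCount, valAt, lookupS, h2]
    · by_cases h2 : a = k'
      · subst h2
        have : k ≠ a := Ne.symm h1
        simp [bumpCount, valAt, lookupS, h1, this]
      · simpa [bumpCount, valAt, lookupS, h1, h2] using ih

lemma contains_bumpCount (m : List (String × Int)) (k k' : String) :
    containsKeyA (bumpCount m k) k' = (k == k' || containsKeyA m k') := by
  induction m with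
  | nil => simp [bumpCount, containsKeyA]
  | cons p t ih =>
    obtain ⟨a, b⟩ := p
    by_cases h1 : a = k
    · subst h1
      by_cases h2 : a = k' <;> simp [bumpCount, containsKeyA, h2]
    · simp [bumpCount, h1, containsKeyA, ih, Bool.or_left_comm]

lemma valAt_multB :
    ∀ (s : List (List (String × String))) (m : List (String × Int)) (k : String),
      valAt (multB s m) k = valAt m k + ((s.map keyOf).count k : Int) := by
  intro s
  induction s with
  | nil => intro m k; simp [multB]
  | cons row rest ih =>
    intro m k
    simp only [multB, List.map_cons, List.count_cons]
    rw [ih, valAt_bumpCount]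
    by_cases h : keyOf row = k
    · simp only [keyOf] at h; simp [keyOf, h]; omega
    · have h' : ((lookupS row "ad_id").getD "") ≠ k := h
      simp [keyOf, h']

lemma contains_multB :
    ∀ (s : List (List (String × String))) (m : List (String × Int)) (k : String),
      containsKeyA (multB s m) k = (containsKeyA m k || decide (k ∈ s.map keyOf)) := by
  intro s
  induction s with
  | nil => intro m k; simp [multB]
  | cons row rest ih =>
    intro m k
    simp only [multB, List.map_cons, List.mem_cons]
    rw [ih, contains_bumpCount]
    by_cases h : (lookupS row "ad_id").getD "" = k
    · simp [keyOf, h]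
    · have hx : ((lookupS row "ad_id").getD "" == k) = false := by simpa using h
      have hy : ¬(k = (lookupS row "ad_id").getD "") := fun hh => h hh.symm
      simp [keyOf, hx, hy, Bool.or_left_comm]

-- per-entry weight of ann entries in B's second loop
def wQ (Q : Option String → Bool) (mult : List (String × Int)) (p : String × List (String × String)) : Int :=
  if Q (hlab (some p.2)) && containsKeyA mult p.1 then valAt mult p.1 else 0

lemma loopB_eq (mult : List (String × Int)) :
    ∀ (ann : List (String × List (String × String))) (t m f filled : Int),
      loopB mult ann [("True", t), ("Maybe", m), ("False", f)] filled =
        (filled + (ann.map (wQ (fun o => o.isSome) mult)).sum,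
         [("True", t + (ann.map (wQ (fun o => o == some "True") mult)).sum),
          ("Maybe", m + (ann.map (wQ (fun o => o == some "Maybe") mult)).sum),
          ("False", f + (ann.map (wQ (fun o => o == some "False") mult)).sum)]) := by
  intro ann
  induction ann with
  | nil => intro t m f filled; simp [loopB]
  | cons p rest ih =>
    intro t m f filled
    obtain ⟨adid, a⟩ := p
    by_cases hae : a.isEmpty
    · simp only [loopB, hae, if_pos]
      simp [ih, wQ, hlab, hae]
    · simp only [loopB, hae, Bool.false_eq_true, not_false_eq_true, if_neg]
      cases hlbl : lookupS a "label" with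
      | none => simp [ih, wQ, hlab, hae, hlbl]
      | some l =>
        by_cases hmem : l = "True" ∨ l = "Maybe" ∨ l = "False"
        · have hck : containsKeyA [("True", t), ("Maybe", m), ("False", f)] l = true := by
            rcases hmem with h | h | h <;> simp [containsKeyA, h]
          cases hmk : containsKeyA mult adid with
          | false =>
            rcases hmem with h | h | h <;> subst h <;>
              simp [hck, hmk, ih, wQ, hlab, hae, hlbl]
          | true =>
            rcases hmem with h | h | h <;> subst h <;>
              simp [hck, hmk, ih, wQ, hlab, hae, hlbl, bumpBy, valAt] <;>
              constructor <;> omega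
        · have h1 : l ≠ "True" := fun h => hmem (Or.inl h)
          have h2 : l ≠ "Maybe" := fun h => hmem (Or.inr (Or.inl h))
          have h3 : l ≠ "False" := fun h => hmem (Or.inr (Or.inr h))
          have hck : containsKeyA [("True", t), ("Maybe", m), ("False", f)] l = false := by
            simp [containsKeyA, Ne.symm h1, Ne.symm h2, Ne.symm h3]
          simp [hck, ih, wQ, hlab, hae, hlbl, h1, h2, h3]

-- grouping lemma: summing multiplicities over ann equals summing indicators over sample
lemma sum_rows_cons (Q : Option String → Bool) (hQ : Q none = false) (k : String) (a : List (String × String))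
    (rest : List (String × List (String × String))) (hres : lookupS rest k = none) :
    ∀ (sample : List (List (String × String))),
      (sample.map (fun row => if Q (hlab (lookupS ((k, a) :: rest) (keyOf row))) then (1 : Int) else 0)).sum
        = (if Q (hlab (some a)) then ((sample.map keyOf).count k : Int) else 0)
          + (sample.map (fun row => if Q (hlab (lookupS rest (keyOf row))) then (1 : Int) else 0)).sum := by
  intro sample
  induction sample with
  | nil => simp
  | cons row srest ih =>
    simp only [List.map_cons, List.sum_cons, List.count_cons]
    rw [ih]
    by_cases h : keyOf row = k
    · have hl : lookupS ((k, a) :: rest) (keyOf row) = some a := by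
        simp [lookupS, h]
      rw [hl, h, hres]
      have hn : Q (hlab none) = false := hQ
      rw [hn]
      by_cases hqa : Q (hlab (some a)) = true <;> simp [hqa] <;> push_cast <;> omega
    · have hl : lookupS ((k, a) :: rest) (keyOf row) = lookupS rest (keyOf row) := by
        have : k ≠ keyOf row := Ne.symm h
        simp [lookupS, this]
      rw [hl]
      have : (keyOf row == k) = false := by simpa using h
      simp [this]
      omega

lemma sumQ (Q : Option String → Bool) (hQ : Q none = false)
    (sample : List (List (String × String))) :
    ∀ (ann : List (String × List (String × String))), (ann.map Prod.fst).Nodup →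
      (ann.map (fun p => if Q (hlab (some p.2)) then ((sample.map keyOf).count p.1 : Int) else 0)).sum
        = (sample.map (fun row => if Q (hlab (lookupS ann (keyOf row))) then (1 : Int) else 0)).sum := by
  intro ann
  induction ann with
  | nil => intro _; simp [lookupS, hlab, hQ]
  | cons p rest ih =>
    intro hnodup
    obtain ⟨k, a⟩ := p
    simp only [List.map_cons, List.nodup_cons] at hnodup
    have hres : lookupS rest k = none := lookupS_eq_none_of_not_mem rest k hnodup.1
    simp only [List.map_cons, List.sum_cons]
    rw [ih hnodup.2, sum_rows_cons Q hQ k a rest hres sample]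

-- wQ with mult = the sample counter reduces to the count-weighted form
lemma wQ_multB (Q : Option String → Bool) (sample : List (List (String × String)))
    (p : String × List (String × String)) :
    wQ Q (multB sample []) p
      = if Q (hlab (some p.2)) then ((sample.map keyOf).count p.1 : Int) else 0 := by
  unfold wQ
  rw [contains_multB, valAt_multB]
  by_cases hmem : p.1 ∈ sample.map keyOf
  · simp [containsKeyA, valAt, lookupS, hmem]
  · have hz : (sample.map keyOf).count p.1 = 0 := by
      simpa using List.count_eq_zero.mpr hmem
    simp [containsKeyA, valAt, lookupS, hmem, hz]

-- labelsL count/length as indicator sums over sample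
lemma labelsL_count (ann : List (String × List (String × String))) (l : String) :
    ∀ (sample : List (List (String × String))),
      ((labelsL ann sample).count l : Int)
        = (sample.map (fun row => if (hlab (lookupS ann (keyOf row)) == some l) = true then (1 : Int) else 0)).sum := by
  intro sample
  induction sample with
  | nil => simp [labelsL]
  | cons row rest ih =>
    simp only [labelsL, List.map_cons, List.sum_cons]
    cases hv : hlab (lookupS ann (keyOf row)) with
    | none => simp [ih]
    | some l' =>
      by_cases h : l' = l
      · subst h; simp [List.count_cons, ih]; push_cast; omega
      · simp [List.count_cons, h, ih]

lemma labelsL_length (ann : List (String × List (String × String))) :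
    ∀ (sample : List (List (String × String))),
      ((labelsL ann sample).length : Int)
        = (sample.map (fun row => if (hlab (lookupS ann (keyOf row))).isSome = true then (1 : Int) else 0)).sum := by
  intro sample
  induction sample with
  | nil => simp [labelsL]
  | cons row rest ih =>
    simp only [labelsL, List.map_cons, List.sum_cons]
    cases hv : hlab (lookupS ann (keyOf row)) with
    | none => simp [ih]
    | some l' => simp [ih]; push_cast; omega

-- ===== VERDICT (by name: the statement is the Claim_ definition above) =====
theorem mark_progress_py_spec : Claim_equal_mark_progress_py := by
  intro sample ann _ hpre
  obtain ⟨hkeys, hnodup⟩ := hpre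
  unfold Spec_mark_progress_py mark_progress_py mark_progress_py_alt
  rw [loopA_eq ann sample hkeys, loopB_eq]
  have hmap : ∀ (Q : Option String → Bool),
      (ann.map (wQ Q (multB sample []))).sum
        = (ann.map (fun p => if Q (hlab (some p.2)) then ((sample.map keyOf).count p.1 : Int) else 0)).sum := by
    intro Q
    congr 1
    exact List.map_congr_left (fun p _ => wQ_multB Q sample p)
  rw [hmap, hmap, hmap, hmap,
      sumQ (fun o => o.isSome) rfl sample ann hnodup,
      sumQ (fun o => o == some "True") rfl sample ann hnodup,
      sumQ (fun o => o == some "Maybe") rfl sample ann hnodup,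
      sumQ (fun o => o == some "False") rfl sample ann hnodup,
      labelsL_count, labelsL_count, labelsL_count, labelsL_length]
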